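-- pv_equiv track=rewrite | github.com/hjoongpt-cloud/EMNIST | src_o/o_train.py | round_pairs_for_slots
-- ===== SOURCE A (Python) =====
-- from typing import Tuple, List
--
-- def round_pairs_for_slots(M: int, boxes: List[Tuple[int,int,int,int]]):
--     G = len(boxes)
--     pairs = []
--     all_pairs = []
--     for i in range(G):
--         for j in range(i+1, G):
--             all_pairs.append((i,j))
--     if len(all_pairs) == 0:
--         all_pairs = [(0,0)]
--     for m in range(M):
--         pairs.append(all_pairs[m % len(all_pairs)])
--     return pairs
-- ===== SOURCE B (Python) =====
-- def round_pairs_for_slots(M, boxes):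
--     G = len(boxes)
--     C = G * (G - 1) // 2
--     if C == 0:
--         return [(0, 0)] * M
--     # generate only the first min(M, C) pairs, row by row, truncating the last row
--     n = min(M, C)
--     out = []
--     i = 0
--     while len(out) < n:
--         need = n - len(out)
--         out.extend((i, j) for j in range(i + 1, min(i + 1 + need, G)))
--         i += 1
--     if M <= C:
--         return out
--     q, r = divmod(M, C)
--     return out * q + out[:r]
-- ===== Notes on version B (the rewrite author's own statement) =====
-- stated objective: faster
-- what changed: B never materialises all G(G-1)/2 pairs: it generates only the first min(M,C) pairs row by row (truncating the last row) and, when M exceeds the cycle length C, tiles that base list q times plus a prefix instead of indexing with m % C for every m.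
import Mathlib
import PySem

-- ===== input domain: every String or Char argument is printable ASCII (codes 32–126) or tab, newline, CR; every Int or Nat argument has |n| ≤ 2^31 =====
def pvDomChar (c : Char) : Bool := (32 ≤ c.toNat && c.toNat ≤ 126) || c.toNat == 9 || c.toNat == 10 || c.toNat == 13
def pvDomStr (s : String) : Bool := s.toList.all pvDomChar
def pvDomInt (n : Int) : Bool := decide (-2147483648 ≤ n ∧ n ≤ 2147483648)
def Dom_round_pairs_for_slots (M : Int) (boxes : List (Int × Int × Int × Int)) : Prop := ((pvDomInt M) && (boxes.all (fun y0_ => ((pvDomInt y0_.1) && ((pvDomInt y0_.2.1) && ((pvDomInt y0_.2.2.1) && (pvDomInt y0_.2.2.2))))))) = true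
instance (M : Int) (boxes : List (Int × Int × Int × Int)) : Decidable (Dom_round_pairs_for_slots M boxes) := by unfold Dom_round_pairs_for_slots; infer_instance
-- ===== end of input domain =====

-- B avoids building all G(G-1)/2 pairs: it generates only the first min(M,C) pairs row by row and tiles them, instead of modulo-indexing a full pair table (objective: faster).

-- ===== PORT A =====
def round_pairs_for_slots (M : Int) (boxes : List (Int × Int × Int × Int)) : List (Int × Int) :=
  let G : Int := PySem.List.len boxes
  let all_pairs : List (Int × Int) :=
    (PySem.List.pyRange 0 G 1).foldl (fun acc i =>
      (PySem.List.pyRange (i+1) G 1).foldl (fun acc2 j => acc2 ++ [(i, j)]) acc) []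
  let all_pairs := if all_pairs.length = 0 then [((0:Int), (0:Int))] else all_pairs
  (PySem.List.pyRange 0 M 1).foldl (fun acc m =>
    acc ++ [PySem.List.pyGetD all_pairs (PySem.Int.mod m (PySem.List.len all_pairs)) ((0:Int), (0:Int))]) []

-- ===== PORT B =====
-- port of Source B's while loop (fuel = number of rows still available; the loop advances i each pass)
def firstPairs : Nat → Int → Int → Nat → List (Int × Int)
  | 0, _, _, _ => []
  | Nat.succ f, G, i, need =>
    if need = 0 then []
    else
      let row := (PySem.List.pyRange (i+1) (min (i+1+(need:Int)) G) 1).map (fun j => (i, j))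
      row ++ firstPairs f G (i+1) (need - row.length)

def round_pairs_for_slots_alt (M : Int) (boxes : List (Int × Int × Int × Int)) : List (Int × Int) :=
  let G : Int := PySem.List.len boxes
  let C : Int := PySem.Int.floordiv (G * (G - 1)) 2
  if C = 0 then List.replicate M.toNat ((0:Int), (0:Int))
  else
    let n : Int := min M C
    let out := firstPairs G.toNat G 0 n.toNat
    if M ≤ C then out
    else
      let q := PySem.Int.floordiv M C
      let r := PySem.Int.mod M C
      (List.replicate q.toNat out).flatten ++ out.take r.toNat

-- ===== PRECONDITION & SPEC =====
def Spec_round_pairs_for_slots (M : Int) (boxes : List (Int × Int × Int × Int)) (out : List (Int × Int)) : Prop := out = round_pairs_for_slots_alt M boxes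
instance (M : Int) (boxes : List (Int × Int × Int × Int)) (out : List (Int × Int)) : Decidable (Spec_round_pairs_for_slots M boxes out) := by unfold Spec_round_pairs_for_slots; infer_instance

-- ===== CLAIM (what is proved, stated in full; the proofs are below) =====
def Claim_equal_round_pairs_for_slots : Prop := ∀ (M : Int) (boxes : List (Int × Int × Int × Int)), Dom_round_pairs_for_slots M boxes → Spec_round_pairs_for_slots M boxes (round_pairs_for_slots M boxes)

-- ===== LEMMAS AND PROOFS =====

def apRec (G i : Int) : List (Int × Int) :=
  if _h : i < G then (PySem.List.pyRange (i+1) G 1).map (fun j => (i, j)) ++ apRec G (i+1)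
  else []
termination_by (G - i).toNat
decreasing_by omega
theorem apRec_stop {G i : Int} (h : ¬ i < G) : apRec G i = [] := by rw [apRec]; simp [h]
theorem apRec_step {G i : Int} (h : i < G) :
    apRec G i = (PySem.List.pyRange (i+1) G 1).map (fun j => (i, j)) ++ apRec G (i+1) := by
  rw [apRec]; simp [h]

theorem apRec_len (G : Int) (i : Int) : 2 * ((apRec G i).length : Int) = max 0 (G - i) * (max 0 (G - i) - 1) := by
  by_cases h : i < G
  · rw [apRec_step h]
    have ih := apRec_len G (i+1)
    simp only [List.length_append, List.length_map, PySem.List.length_pyRange_one] at *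
    have h1 : max 0 (G - (i+1)) = G - i - 1 := by omega
    have h2 : max 0 (G - i) = G - i := by omega
    have h3 : ((G - (i+1)).toNat : Int) = G - i - 1 := by omega
    rw [h1] at ih
    rw [h2]
    push_cast
    rw [h3]
    nlinarith [ih]
  · rw [apRec_stop h]; simp; omega
termination_by (G - i).toNat
decreasing_by omega

theorem pyRange_take (a b : Int) (n : Nat) :
    (PySem.List.pyRange a b 1).take n = PySem.List.pyRange a (min (a + n) b) 1 := by
  rw [PySem.List.pyRange_one a b, PySem.List.pyRange_one a (min (a + n) b)]
  rw [← List.map_take, List.take_range]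
  congr 1
  congr 1
  omega

theorem firstPairs_take (G : Int) : ∀ (f : Nat) (i : Int) (need : Nat),
    (G - i).toNat ≤ f → need ≤ (apRec G i).length →
    firstPairs f G i need = (apRec G i).take need := by
  intro f
  induction f with
  | zero =>
    intro i need hf hn
    rw [apRec_stop (by omega)] at hn ⊢
    simp at hn
    simp [firstPairs, hn]
  | succ f ih =>
    intro i need hf hn
    by_cases h0 : need = 0
    · simp [firstPairs, h0]
    · have hiG : i < G := by
        by_contra h
        rw [apRec_stop h] at hn; simp at hn; omega
      rw [firstPairs]
      simp only [h0, if_false]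
      rw [apRec_step hiG] at hn ⊢
      have hrow : (PySem.List.pyRange (i+1) (min (i+1+(need:Int)) G) 1).map (fun j => ((i:Int), j))
          = ((PySem.List.pyRange (i+1) G 1).map (fun j => ((i:Int), j))).take need := by
        rw [← List.map_take, pyRange_take]
      simp only [hrow]
      rw [List.take_append]
      congr 1
      · rw [List.length_take, List.length_map]
        have hlen : need - min need ((PySem.List.pyRange (i+1) G 1).map (fun j => ((i:Int), j))).length
            = need - (PySem.List.pyRange (i+1) G 1).length := by
          simp only [List.length_map]; omega
        rw [List.length_map] at hlen
        rw [hlen]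
        apply ih
        · omega
        · simp only [List.length_append, List.length_map] at hn
          omega
theorem map_getD_range (AP : List (Int × Int)) (d : Int × Int) (r : Nat) (hr : r ≤ AP.length) :
    (List.range r).map (fun k => AP.getD k d) = AP.take r := by
  apply List.ext_getElem
  · simp [hr]
  · intro n h1 h2
    simp only [List.getElem_map, List.getElem_range, List.getElem_take]
    simp at h1
    rw [List.getD_eq_getElem AP d (by omega)]

theorem cyc (AP : List (Int × Int)) (d : Int × Int) (_hc0 : 0 < AP.length) :
    ∀ (q r : Nat), r ≤ AP.length →
    (List.range (q * AP.length + r)).map (fun k => AP.getD (k % AP.length) d)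
      = (List.replicate q AP).flatten ++ AP.take r := by
  intro q
  induction q with
  | zero =>
    intro r hr
    simp only [Nat.zero_mul, Nat.zero_add, List.replicate_zero, List.flatten_nil, List.nil_append]
    rw [← map_getD_range AP d r hr]
    apply List.map_congr_left
    intro k hk
    simp at hk
    rw [Nat.mod_eq_of_lt (by omega)]
  | succ q ih =>
    intro r hr
    have hsplit : (q+1) * AP.length + r = AP.length + (q * AP.length + r) := by ring
    rw [hsplit, List.range_add, List.map_append]
    rw [List.replicate_succ, List.flatten_cons, List.append_assoc]
    congr 1
    · have h1 : List.map (fun k => AP.getD (k % AP.length) d) (List.range AP.length)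
          = List.map (fun k => AP.getD k d) (List.range AP.length) := by
        apply List.map_congr_left
        intro k hk
        simp at hk
        rw [Nat.mod_eq_of_lt hk]
      rw [h1, map_getD_range AP d AP.length (le_refl _), List.take_length]
    · rw [← ih r hr]
      rw [List.map_map]
      apply List.map_congr_left
      intro k hk
      simp only [Function.comp_apply]
      congr 1
      exact Nat.add_mod_left _ _

theorem foldl_apRec (G : Int) (i : Int) (acc : List (Int × Int)) :
    (PySem.List.pyRange i G 1).foldl (fun acc i =>
      (PySem.List.pyRange (i+1) G 1).foldl (fun acc2 j => acc2 ++ [(i, j)]) acc) acc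
    = acc ++ apRec G i := by
  by_cases h : i < G
  · rw [PySem.List.pyRange_one_cons h, apRec_step h]
    simp only [List.foldl_cons]
    rw [foldl_apRec G (i+1)]
    rw [PySem.List.foldl_append_singleton_eq_map]
    simp
  · rw [PySem.List.pyRange_one_eq_nil (by omega), apRec_stop h]; simp
termination_by (G - i).toNat
decreasing_by omega

theorem main (M : Int) (boxes : List (Int × Int × Int × Int)) :
    round_pairs_for_slots M boxes = round_pairs_for_slots_alt M boxes := by
  simp only [round_pairs_for_slots, round_pairs_for_slots_alt, PySem.List.len_eq]
  set G : Int := (boxes.length : Int) with hG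
  have hG0 : 0 ≤ G := by positivity
  set AP := apRec G 0 with hAP
  set L := AP.length with hL
  have hlen : 2 * (L : Int) = G * (G - 1) := by
    have := apRec_len G 0
    rw [max_eq_right (by omega), sub_zero] at this
    exact this
  have hC : PySem.Int.floordiv (G * (G - 1)) 2 = (L : Int) := by
    rw [← hlen, PySem.Int.floordiv_eq_ediv_of_pos (by norm_num)]
    exact Int.mul_ediv_cancel_left _ (by norm_num)
  rw [foldl_apRec, List.nil_append, ← hAP, hC]
  rw [PySem.List.foldl_append_singleton_eq_map, List.nil_append]
  by_cases hL0 : L = 0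
  · -- C == 0 : all_pairs is [(0,0)], B replicates
    have hAPnil : AP = [] := List.length_eq_zero_iff.mp hL0
    simp only [hAPnil, List.length_nil, hL0, Int.natCast_zero]
    rw [PySem.List.pyRange_one 0 M]
    rw [List.map_map]
    have : ∀ k : Nat, PySem.List.pyGetD [((0:Int),(0:Int))] (PySem.Int.mod (0 + (k:Int)) (PySem.List.len [((0:Int),(0:Int))])) ((0:Int),(0:Int)) = ((0:Int),(0:Int)) := by
      intro k
      simp [PySem.List.len_eq]
    calc List.map _ (List.range (M - 0).toNat) = List.map (fun _ => ((0:Int),(0:Int))) (List.range (M-0).toNat) := List.map_congr_left (fun k _ => this k)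
      _ = List.replicate M.toNat ((0:Int),(0:Int)) := by rw [List.map_const']; simp
  · -- C > 0
    have hLpos : 0 < L := Nat.pos_of_ne_zero hL0
    simp only [if_neg (by exact_mod_cast hL0 : ¬ ((L:Int) = 0))]
    rw [if_neg (show ¬ AP.length = 0 by omega)]
    by_cases hM0 : M ≤ 0
    · -- M ≤ 0: both empty
      rw [PySem.List.pyRange_one_eq_nil (by omega)]
      simp only [List.map_nil]
      have hmin : (min M (L:Int)).toNat = 0 := by omega
      rw [if_pos (by omega), hmin]
      cases hf : G.toNat with
      | zero => simp [firstPairs]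
      | succ f => simp [firstPairs]
    · set K := M.toNat with hK
      have hMK : (K : Int) = M := Int.toNat_of_nonneg (by omega)
      have hA : (PySem.List.pyRange 0 M 1).map
          (fun m => PySem.List.pyGetD AP (PySem.Int.mod m (AP.length : Int)) ((0:Int),(0:Int)))
          = (List.range K).map (fun k => AP.getD (k % L) ((0:Int),(0:Int))) := by
        rw [← hMK, PySem.List.pyRange_zero_natCast, List.map_map]
        apply List.map_congr_left
        intro k _
        simp only [Function.comp_apply]
        rw [← hL, PySem.Int.mod_natCast, PySem.List.pyGetD_natCast]
      rw [hA]
      by_cases hMC : M ≤ (L : Int)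
      · -- M ≤ C: both are AP.take K
        rw [if_pos hMC]
        have hmin : (min M (L:Int)).toNat = K := by omega
        rw [hmin, firstPairs_take G G.toNat 0 K (by omega) (by rw [← hAP, ← hL]; omega)]
        rw [← hAP]
        have := cyc AP ((0:Int),(0:Int)) hLpos 0 K (by omega)
        simpa using this
      · rw [if_neg hMC]
        have hmin : (min M (L:Int)).toNat = L := by omega
        have htake : List.take L AP = AP := by rw [hL]; exact List.take_length
        rw [hmin, firstPairs_take G G.toNat 0 L (by omega) (by rw [← hAP, ← hL]), ← hAP, htake]
        set q := PySem.Int.floordiv M (L:Int) with hq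
        set r := PySem.Int.mod M (L:Int) with hr
        have hq0 : 0 ≤ q := PySem.Int.floordiv_nonneg (by omega) (by omega)
        have hr0 : 0 ≤ r := PySem.Int.mod_nonneg M (by exact_mod_cast hLpos)
        have hrL : r < (L:Int) := PySem.Int.mod_lt M (by exact_mod_cast hLpos)
        have hM : q * (L:Int) + r = M := PySem.Int.floordiv_mul_add_mod M (L:Int)
        have hKsplit : K = q.toNat * L + r.toNat := by
          have h1 : ((q.toNat * L + r.toNat : Nat) : Int) = (K : Int) := by
            push_cast [Int.toNat_of_nonneg hq0, Int.toNat_of_nonneg hr0]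
            rw [hMK]; exact hM
          exact_mod_cast h1.symm
        rw [hKsplit, cyc AP ((0:Int),(0:Int)) hLpos q.toNat r.toNat (by omega)]

-- ===== VERDICT (by name: the statement is the Claim_ definition above) =====
theorem round_pairs_for_slots_spec : Claim_equal_round_pairs_for_slots := by
  intro M boxes _
  unfold Spec_round_pairs_for_slots
  exact main M boxes
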